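-- pv_equiv track=rewrite | github.com/intercom/gtm-mirofish-demo | backend/app/services/whatif_engine.py | _infer_modification_type
-- ===== SOURCE A (Python) =====
-- from enum import Enum
--
-- class ModificationType(str, Enum):
--     CHANGE_AGENT_COUNT = "change_agent_count"
--     CHANGE_AGENT_PERSONALITY = "change_agent_personality"
--     CHANGE_ENVIRONMENT = "change_environment"
--     CHANGE_LLM_PROVIDER = "change_llm_provider"
--     CHANGE_ROUNDS = "change_rounds"
--     CHANGE_CONSTRAINTS = "change_constraints"
--
-- PERSONA_TYPES = [
--     "vp_support", "cx_director", "it_leader", "operations",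
--     "finance", "support_manager", "cto", "customer_success",
-- ]
--
-- def _infer_modification_type(parameter: str) -> ModificationType:
--     """Infer the modification type from a parameter name."""
--     mapping = {
--         "agent_count": ModificationType.CHANGE_AGENT_COUNT,
--         "total_rounds": ModificationType.CHANGE_ROUNDS,
--         "round_count": ModificationType.CHANGE_ROUNDS,
--         "temperature": ModificationType.CHANGE_LLM_PROVIDER,
--         "llm_provider": ModificationType.CHANGE_LLM_PROVIDER,
--         "competitive_intensity": ModificationType.CHANGE_ENVIRONMENT,
--         "market_sentiment": ModificationType.CHANGE_ENVIRONMENT,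
--         "budget_pressure": ModificationType.CHANGE_ENVIRONMENT,
--         "industry_focus": ModificationType.CHANGE_ENVIRONMENT,
--         "max_posts_per_agent": ModificationType.CHANGE_CONSTRAINTS,
--         "reply_probability": ModificationType.CHANGE_CONSTRAINTS,
--         "like_probability": ModificationType.CHANGE_CONSTRAINTS,
--         "repost_probability": ModificationType.CHANGE_CONSTRAINTS,
--     }
--     for key in PERSONA_TYPES:
--         mapping[key] = ModificationType.CHANGE_AGENT_PERSONALITY
--     return mapping.get(parameter, ModificationType.CHANGE_ENVIRONMENT)
-- ===== SOURCE B (Python) =====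
-- from enum import Enum
--
-- class ModificationType(str, Enum):
--     CHANGE_AGENT_COUNT = "change_agent_count"
--     CHANGE_AGENT_PERSONALITY = "change_agent_personality"
--     CHANGE_ENVIRONMENT = "change_environment"
--     CHANGE_LLM_PROVIDER = "change_llm_provider"
--     CHANGE_ROUNDS = "change_rounds"
--     CHANGE_CONSTRAINTS = "change_constraints"
--
-- PERSONA_TYPES = [
--     "vp_support", "cx_director", "it_leader", "operations",
--     "finance", "support_manager", "cto", "customer_success",
-- ]
--
-- # Module-level table of (parameter name, modification type), sorted by name,
-- # so each lookup is a comparison-based binary search instead of a dict built per call.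
-- _TABLE = [
--     ("agent_count", ModificationType.CHANGE_AGENT_COUNT),
--     ("budget_pressure", ModificationType.CHANGE_ENVIRONMENT),
--     ("competitive_intensity", ModificationType.CHANGE_ENVIRONMENT),
--     ("cto", ModificationType.CHANGE_AGENT_PERSONALITY),
--     ("customer_success", ModificationType.CHANGE_AGENT_PERSONALITY),
--     ("cx_director", ModificationType.CHANGE_AGENT_PERSONALITY),
--     ("finance", ModificationType.CHANGE_AGENT_PERSONALITY),
--     ("industry_focus", ModificationType.CHANGE_ENVIRONMENT),
--     ("it_leader", ModificationType.CHANGE_AGENT_PERSONALITY),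
--     ("like_probability", ModificationType.CHANGE_CONSTRAINTS),
--     ("llm_provider", ModificationType.CHANGE_LLM_PROVIDER),
--     ("market_sentiment", ModificationType.CHANGE_ENVIRONMENT),
--     ("max_posts_per_agent", ModificationType.CHANGE_CONSTRAINTS),
--     ("operations", ModificationType.CHANGE_AGENT_PERSONALITY),
--     ("reply_probability", ModificationType.CHANGE_CONSTRAINTS),
--     ("repost_probability", ModificationType.CHANGE_CONSTRAINTS),
--     ("round_count", ModificationType.CHANGE_ROUNDS),
--     ("support_manager", ModificationType.CHANGE_AGENT_PERSONALITY),
--     ("temperature", ModificationType.CHANGE_LLM_PROVIDER),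
--     ("total_rounds", ModificationType.CHANGE_ROUNDS),
--     ("vp_support", ModificationType.CHANGE_AGENT_PERSONALITY),
-- ]
--
-- def _infer_modification_type(parameter: str) -> ModificationType:
--     """Infer the modification type from a parameter name (binary search in a sorted table)."""
--     lo, hi = 0, len(_TABLE)
--     while lo < hi:
--         mid = (lo + hi) // 2
--         key, value = _TABLE[mid]
--         if key < parameter:
--             lo = mid + 1
--         elif parameter < key:
--             hi = mid
--         else:
--             return value
--     return ModificationType.CHANGE_ENVIRONMENT
-- ===== Notes on version B (the rewrite author's own statement) =====
-- stated objective: alternative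
-- what changed: Replaced the dict literal rebuilt (plus a persona-key insertion loop) on every call with a module-level table sorted by parameter name and a hand-written lo/hi binary search, falling through to the environment default when the search window empties.
import Mathlib
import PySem

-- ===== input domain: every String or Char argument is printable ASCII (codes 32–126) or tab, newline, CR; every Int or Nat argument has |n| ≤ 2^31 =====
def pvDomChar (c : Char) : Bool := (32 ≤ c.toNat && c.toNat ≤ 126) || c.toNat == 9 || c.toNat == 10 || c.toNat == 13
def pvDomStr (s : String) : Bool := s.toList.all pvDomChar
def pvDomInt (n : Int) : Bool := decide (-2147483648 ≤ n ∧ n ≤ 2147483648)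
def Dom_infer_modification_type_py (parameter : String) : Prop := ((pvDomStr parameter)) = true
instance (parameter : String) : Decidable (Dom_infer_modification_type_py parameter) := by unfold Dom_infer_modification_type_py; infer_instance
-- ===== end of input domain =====

-- B replaces A's per-call dict construction (a dict literal plus a persona-key insertion
-- loop) with a fixed table sorted by name and a lo/hi binary search; objective: alternative.

-- ===== PORT A =====
def PERSONA_TYPES : List String :=
  ["vp_support", "cx_director", "it_leader", "operations",
   "finance", "support_manager", "cto", "customer_success"]

-- the local variable 'mapping' of A, after its persona-key insertion loop
def pvAMapping : PySem.Dict String String :=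
  PERSONA_TYPES.foldl (fun d key => d.insert key "change_agent_personality")
    (PySem.Dict.ofList
      [("agent_count", "change_agent_count"),
       ("total_rounds", "change_rounds"),
       ("round_count", "change_rounds"),
       ("temperature", "change_llm_provider"),
       ("llm_provider", "change_llm_provider"),
       ("competitive_intensity", "change_environment"),
       ("market_sentiment", "change_environment"),
       ("budget_pressure", "change_environment"),
       ("industry_focus", "change_environment"),
       ("max_posts_per_agent", "change_constraints"),
       ("reply_probability", "change_constraints"),
       ("like_probability", "change_constraints"),
       ("repost_probability", "change_constraints")])

def infer_modification_type_py (parameter : String) : String :=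
  pvAMapping.getD parameter "change_environment"

-- ===== PORT B =====
-- Source B's _TABLE: (parameter name, modification type), sorted by name
def pvTable : List (String × String) :=
  [("agent_count", "change_agent_count"),
   ("budget_pressure", "change_environment"),
   ("competitive_intensity", "change_environment"),
   ("cto", "change_agent_personality"),
   ("customer_success", "change_agent_personality"),
   ("cx_director", "change_agent_personality"),
   ("finance", "change_agent_personality"),
   ("industry_focus", "change_environment"),
   ("it_leader", "change_agent_personality"),
   ("like_probability", "change_constraints"),
   ("llm_provider", "change_llm_provider"),
   ("market_sentiment", "change_environment"),
   ("max_posts_per_agent", "change_constraints"),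
   ("operations", "change_agent_personality"),
   ("reply_probability", "change_constraints"),
   ("repost_probability", "change_constraints"),
   ("round_count", "change_rounds"),
   ("support_manager", "change_agent_personality"),
   ("temperature", "change_llm_provider"),
   ("total_rounds", "change_rounds"),
   ("vp_support", "change_agent_personality")]

-- Source B's 'while lo < hi' binary-search loop, as the obvious recursion on the window
-- size; the fuel argument (= hi - lo at the call) only makes the recursion structural
def pvBsearch (fuel : Nat) (parameter : String) (lo hi : Nat) : Option String :=
  match fuel with
  | 0 => none
  | fuel + 1 =>
    if lo < hi then
      let mid := (lo + hi) / 2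
      match pvTable[mid]? with
      | none => none   -- unreachable: mid < hi ≤ pvTable.length at every call
      | some (key, value) =>
        -- Python str '<' is code-point lexicographic = Lean '<' on .toList (PySem note on str comparison)
        if key.toList < parameter.toList then pvBsearch fuel parameter (mid + 1) hi
        else if parameter.toList < key.toList then pvBsearch fuel parameter lo mid
        else some value
    else none

def infer_modification_type_py_alt (parameter : String) : String :=
  (pvBsearch pvTable.length parameter 0 pvTable.length).getD "change_environment"

-- ===== PRECONDITION & SPEC =====
def Spec_infer_modification_type_py (parameter : String) (out : String) : Prop := out = infer_modification_type_py_alt parameter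
instance (parameter : String) (out : String) : Decidable (Spec_infer_modification_type_py parameter out) := by unfold Spec_infer_modification_type_py; infer_instance

-- ===== CLAIM (what is proved, stated in full; the proofs are below) =====
def Claim_equal_infer_modification_type_py : Prop := ∀ (parameter : String), Dom_infer_modification_type_py parameter → Spec_infer_modification_type_py parameter (infer_modification_type_py parameter)

-- ===== LEMMAS AND PROOFS =====

-- every key either of the two programs ever tests against
def pvKeys : List String := ["agent_count", "total_rounds", "round_count", "temperature", "llm_provider", "competitive_intensity", "market_sentiment", "budget_pressure", "industry_focus", "max_posts_per_agent", "reply_probability", "like_probability", "repost_probability", "vp_support", "cx_director", "it_leader", "operations", "finance", "support_manager", "cto", "customer_success"]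

theorem pvTable_keys_mem : ∀ kv ∈ pvTable, kv.1 ∈ pvKeys := by decide

-- if the parameter is none of the table's keys, the binary search comes up empty
theorem pvBsearch_not_mem (parameter : String) (h : parameter ∉ pvKeys) :
    ∀ fuel lo hi, pvBsearch fuel parameter lo hi = none := by
  intro fuel
  induction fuel with
  | zero => intro lo hi; rfl
  | succ fuel ih =>
    intro lo hi
    unfold pvBsearch
    split
    · cases hget : pvTable[(lo + hi) / 2]? with
      | none => simp only [hget]
      | some kv =>
        obtain ⟨key, value⟩ := kv
        simp only [hget]
        have hk : key ∈ pvKeys :=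
          pvTable_keys_mem _ (List.mem_of_getElem? hget)
        have hne : key.toList ≠ parameter.toList := fun he => h ((String.toList_inj.mp he) ▸ hk)
        rcases lt_trichotomy key.toList parameter.toList with hc | hc | hc
        · rw [if_pos hc]; exact ih _ _
        · exact absurd hc hne
        · rw [if_neg (not_lt_of_gt hc), if_pos hc]; exact ih _ _
    · rfl

-- A's fully built dict, evaluated to its item list once and for all
theorem pvAMapping_eval : pvAMapping = PySem.Dict.mk
    [("agent_count", "change_agent_count"),
     ("total_rounds", "change_rounds"),
     ("round_count", "change_rounds"),
     ("temperature", "change_llm_provider"),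
     ("llm_provider", "change_llm_provider"),
     ("competitive_intensity", "change_environment"),
     ("market_sentiment", "change_environment"),
     ("budget_pressure", "change_environment"),
     ("industry_focus", "change_environment"),
     ("max_posts_per_agent", "change_constraints"),
     ("reply_probability", "change_constraints"),
     ("like_probability", "change_constraints"),
     ("repost_probability", "change_constraints"),
     ("vp_support", "change_agent_personality"),
     ("cx_director", "change_agent_personality"),
     ("it_leader", "change_agent_personality"),
     ("operations", "change_agent_personality"),
     ("finance", "change_agent_personality"),
     ("support_manager", "change_agent_personality"),
     ("cto", "change_agent_personality"),
     ("customer_success", "change_agent_personality")] := by decide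

-- ===== VERDICT (by name: the statement is the Claim_ definition above) =====
theorem infer_modification_type_py_spec : Claim_equal_infer_modification_type_py := by
  intro parameter _
  unfold Spec_infer_modification_type_py
  by_cases hm : parameter ∈ pvKeys
  · simp only [pvKeys, List.mem_cons, List.not_mem_nil, or_false] at hm
    rcases hm with rfl|rfl|rfl|rfl|rfl|rfl|rfl|rfl|rfl|rfl|rfl|rfl|rfl|rfl|rfl|rfl|rfl|rfl|rfl|rfl|rfl <;> decide
  · -- A side: every key comparison in the dict lookup fails
    have hb := pvBsearch_not_mem parameter hm pvTable.length 0 pvTable.length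
    simp only [pvKeys, List.mem_cons, List.not_mem_nil, or_false, not_or] at hm
    obtain ⟨h1, h2, h3, h4, h5, h6, h7, h8, h9, h10, h11, h12, h13, h14, h15, h16, h17, h18, h19, h20, h21⟩ := hm
    have e1 : ("agent_count" == parameter) = false := beq_eq_false_iff_ne.mpr (Ne.symm h1)
    have e2 : ("total_rounds" == parameter) = false := beq_eq_false_iff_ne.mpr (Ne.symm h2)
    have e3 : ("round_count" == parameter) = false := beq_eq_false_iff_ne.mpr (Ne.symm h3)
    have e4 : ("temperature" == parameter) = false := beq_eq_false_iff_ne.mpr (Ne.symm h4)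
    have e5 : ("llm_provider" == parameter) = false := beq_eq_false_iff_ne.mpr (Ne.symm h5)
    have e6 : ("competitive_intensity" == parameter) = false := beq_eq_false_iff_ne.mpr (Ne.symm h6)
    have e7 : ("market_sentiment" == parameter) = false := beq_eq_false_iff_ne.mpr (Ne.symm h7)
    have e8 : ("budget_pressure" == parameter) = false := beq_eq_false_iff_ne.mpr (Ne.symm h8)
    have e9 : ("industry_focus" == parameter) = false := beq_eq_false_iff_ne.mpr (Ne.symm h9)
    have e10 : ("max_posts_per_agent" == parameter) = false := beq_eq_false_iff_ne.mpr (Ne.symm h10)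
    have e11 : ("reply_probability" == parameter) = false := beq_eq_false_iff_ne.mpr (Ne.symm h11)
    have e12 : ("like_probability" == parameter) = false := beq_eq_false_iff_ne.mpr (Ne.symm h12)
    have e13 : ("repost_probability" == parameter) = false := beq_eq_false_iff_ne.mpr (Ne.symm h13)
    have e14 : ("vp_support" == parameter) = false := beq_eq_false_iff_ne.mpr (Ne.symm h14)
    have e15 : ("cx_director" == parameter) = false := beq_eq_false_iff_ne.mpr (Ne.symm h15)
    have e16 : ("it_leader" == parameter) = false := beq_eq_false_iff_ne.mpr (Ne.symm h16)
    have e17 : ("operations" == parameter) = false := beq_eq_false_iff_ne.mpr (Ne.symm h17)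
    have e18 : ("finance" == parameter) = false := beq_eq_false_iff_ne.mpr (Ne.symm h18)
    have e19 : ("support_manager" == parameter) = false := beq_eq_false_iff_ne.mpr (Ne.symm h19)
    have e20 : ("cto" == parameter) = false := beq_eq_false_iff_ne.mpr (Ne.symm h20)
    have e21 : ("customer_success" == parameter) = false := beq_eq_false_iff_ne.mpr (Ne.symm h21)
    unfold infer_modification_type_py infer_modification_type_py_alt
    rw [pvAMapping_eval, hb]
    simp only [PySem.Dict.getD, PySem.Dict.get?, List.find?_cons, List.find?_nil,
      e1, e2, e3, e4, e5, e6, e7, e8, e9, e10, e11, e12, e13, e14, e15, e16, e17, e18, e19, e20, e21]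
    rfl
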